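-- pv_equiv track=rewrite | github.com/paramkansagra/POD-Questions | February_2022/26_02_2022/Longest_ordered_vowel_sequence.py | max_unique_vovels
-- ===== SOURCE A (Python) =====
-- def max_unique_vovels(words):
--     vovels = 'aeiou'
--     maxx = 0
--     final = []
--     for i in words:
--         count = 0
--         x = ''
--         for j in i:
--             if(j in vovels and j not in x):
--                 x += j
--                 count += 1
--         if(count>maxx):
--             final = [i]
--             maxx = count
--         elif(count == maxx):
--             final.append(i)
--     return final
-- ===== SOURCE B (Python) =====
-- def max_unique_vovels(words):
--     if not words:
--         return []
--     counts = [sum(v in w for v in 'aeiou') for w in words]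
--     m = max(counts)
--     return [w for w, c in zip(words, counts) if c == m]
-- ===== Notes on version B (the rewrite author's own statement) =====
-- stated objective: simpler
-- what changed: Replaces the single-pass running-max with incremental rebuilding of the result list (and the inner seen-vowels string loop) by a compute-all-counts / max / filter decomposition, counting distinct vowels by membership of each of the five vowels in the word.
import Mathlib
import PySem

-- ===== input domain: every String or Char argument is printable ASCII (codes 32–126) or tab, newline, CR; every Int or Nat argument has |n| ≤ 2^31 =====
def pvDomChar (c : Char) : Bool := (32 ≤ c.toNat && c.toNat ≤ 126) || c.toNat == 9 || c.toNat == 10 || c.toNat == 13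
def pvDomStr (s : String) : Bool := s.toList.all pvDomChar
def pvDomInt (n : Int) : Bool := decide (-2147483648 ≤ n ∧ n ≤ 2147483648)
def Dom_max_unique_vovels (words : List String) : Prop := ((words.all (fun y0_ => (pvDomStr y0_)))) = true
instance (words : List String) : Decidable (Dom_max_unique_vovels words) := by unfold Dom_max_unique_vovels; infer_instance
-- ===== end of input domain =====

-- B replaces A's single-pass running-max construction (with its inner seen-vowels
-- string loop) by a counts-list / max / filter decomposition; objective: simpler.

-- ===== PORT A =====
-- inner loop of A: state (count, x), scanning the characters of the word
def cntA (w : String) : Nat :=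
  (w.toList.foldl
    (fun (st : Nat × List Char) j =>
      if j ∈ "aeiou".toList ∧ j ∉ st.2 then (st.1 + 1, st.2 ++ [j]) else st)
    (0, [])).1

def max_unique_vovels (words : List String) : List String :=
  (words.foldl
    (fun (st : Nat × List String) i =>
      let count := cntA i
      if count > st.1 then (count, [i])
      else if count = st.1 then (st.1, st.2 ++ [i])
      else st)
    (0, [])).2

-- ===== PORT B =====
-- sum(v in w for v in 'aeiou')
def cntB (w : String) : Nat :=
  (("aeiou".toList).filter (fun v => decide (v ∈ w.toList))).length

def max_unique_vovels_alt (words : List String) : List String :=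
  if words = [] then []
  else
    let counts := words.map cntB
    let m := (PySem.List.max? counts (fun c => c)).getD 0
    ((words.zip counts).filter (fun p => decide (p.2 = m))).map Prod.fst

-- ===== PRECONDITION & SPEC =====
def Spec_max_unique_vovels (words : List String) (out : List String) : Prop := out = max_unique_vovels_alt words
instance (words : List String) (out : List String) : Decidable (Spec_max_unique_vovels words out) := by unfold Spec_max_unique_vovels; infer_instance

-- ===== CLAIM (what is proved, stated in full; the proofs are below) =====
def Claim_equal_max_unique_vovels : Prop := ∀ (words : List String), Dom_max_unique_vovels words → Spec_max_unique_vovels words (max_unique_vovels words)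

-- ===== LEMMAS AND PROOFS =====

-- A's inner-loop step, with the vowel list abstracted (definitionally equal to the port's lambda)
def stepC (vo : List Char) (st : Nat × List Char) (j : Char) : Nat × List Char :=
  if j ∈ vo ∧ j ∉ st.2 then (st.1 + 1, st.2 ++ [j]) else st

-- the x-component of that loop, on its own
def gLoop (vo : List Char) (l : List Char) (x : List Char) : List Char :=
  l.foldl (fun x j => if j ∈ vo ∧ j ∉ x then x ++ [j] else x) x

theorem gLoop_nil (vo x : List Char) : gLoop vo [] x = x := rfl

theorem gLoop_cons (vo : List Char) (j : Char) (t x : List Char) :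
    gLoop vo (j :: t) x = gLoop vo t (if j ∈ vo ∧ j ∉ x then x ++ [j] else x) := rfl

theorem stepC_eq (vo : List Char) (n : Nat) (x : List Char) (j : Char) :
    stepC vo (n, x) j = if j ∈ vo ∧ j ∉ x then (n + 1, x ++ [j]) else (n, x) := by
  unfold stepC; split_ifs <;> rfl

theorem gfst (vo : List Char) (l : List Char) : ∀ (x : List Char),
    (l.foldl (stepC vo) (x.length, x)).1 = (gLoop vo l x).length := by
  induction l with
  | nil => intro x; rfl
  | cons j t ih =>
    intro x
    rw [List.foldl_cons, stepC_eq, gLoop_cons]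
    by_cases h : j ∈ vo ∧ j ∉ x
    · rw [if_pos h, if_pos h]
      have := ih (x ++ [j])
      simpa [List.length_append] using this
    · rw [if_neg h, if_neg h]
      exact ih x

theorem gmem (vo : List Char) (l : List Char) : ∀ (x : List Char) (c : Char),
    c ∈ gLoop vo l x ↔ c ∈ x ∨ (c ∈ vo ∧ c ∈ l) := by
  induction l with
  | nil => intro x c; simp [gLoop_nil]
  | cons j t ih =>
    intro x c
    rw [gLoop_cons]
    by_cases h : j ∈ vo ∧ j ∉ x
    · rw [if_pos h, ih]
      simp only [List.mem_append, List.mem_cons, List.not_mem_nil, or_false]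
      constructor
      · rintro ((hx | rfl) | ⟨hv, ht⟩)
        · exact Or.inl hx
        · exact Or.inr ⟨h.1, Or.inl rfl⟩
        · exact Or.inr ⟨hv, Or.inr ht⟩
      · rintro (hx | ⟨hv, (rfl | ht)⟩)
        · exact Or.inl (Or.inl hx)
        · exact Or.inl (Or.inr rfl)
        · exact Or.inr ⟨hv, ht⟩
    · rw [if_neg h, ih]
      simp only [List.mem_cons]
      constructor
      · rintro (hx | ⟨hv, ht⟩)
        · exact Or.inl hx
        · exact Or.inr ⟨hv, Or.inr ht⟩
      · rintro (hx | ⟨hv, (rfl | ht)⟩)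
        · exact Or.inl hx
        · rcases not_and_or.mp h with h' | h'
          · exact absurd hv h'
          · exact Or.inl (not_not.mp h')
        · exact Or.inr ⟨hv, ht⟩

theorem gnodup (vo : List Char) (l : List Char) : ∀ (x : List Char), x.Nodup → (gLoop vo l x).Nodup := by
  induction l with
  | nil => intro x hx; simpa [gLoop_nil] using hx
  | cons j t ih =>
    intro x hx
    rw [gLoop_cons]
    by_cases h : j ∈ vo ∧ j ∉ x
    · rw [if_pos h]
      have hcons : (j :: x).Nodup := List.nodup_cons.mpr ⟨h.2, hx⟩
      exact ih _ ((List.perm_append_singleton j x).symm.nodup hcons)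
    · rw [if_neg h]
      exact ih _ hx

theorem gcnt (vo : List Char) (hvo : vo.Nodup) (l : List Char) :
    (l.foldl (stepC vo) (0, [])).1 = (vo.filter (fun v => decide (v ∈ l))).length := by
  have h1 : (l.foldl (stepC vo) (0, [])).1 = (gLoop vo l []).length := gfst vo l []
  rw [h1]
  have hperm : List.Perm (gLoop vo l []) (vo.filter (fun v => decide (v ∈ l))) := by
    rw [List.perm_ext_iff_of_nodup (gnodup vo l [] List.nodup_nil) (List.Nodup.filter _ hvo)]
    intro c
    rw [gmem, List.mem_filter]
    simp
  exact hperm.length_eq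

theorem cntA_eq_cntB (w : String) : cntA w = cntB w := by
  have : cntA w = (w.toList.foldl (stepC "aeiou".toList) (0, [])).1 := rfl
  rw [this, gcnt "aeiou".toList (by decide) w.toList, cntB]

-- A's outer loop
def stepA (st : Nat × List String) (i : String) : Nat × List String :=
  let count := cntA i
  if count > st.1 then (count, [i])
  else if count = st.1 then (st.1, st.2 ++ [i])
  else st

def runMax (ws : List String) (m : Nat) : Nat :=
  ws.foldl (fun a w => max a (cntA w)) m

theorem le_runMax (ws : List String) : ∀ m, m ≤ runMax ws m := by
  induction ws with
  | nil => intro m; simp [runMax]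
  | cons w t ih =>
    intro m
    simp only [runMax, List.foldl_cons]
    exact le_trans (le_max_left m (cntA w)) (ih (max m (cntA w)))

theorem foldA_char (ws : List String) : ∀ (m : Nat) (f : List String),
    (ws.foldl stepA (m, f)).2 =
      if runMax ws m > m then ws.filter (fun w => decide (cntA w = runMax ws m))
      else f ++ ws.filter (fun w => decide (cntA w = m)) := by
  induction ws with
  | nil => intro m f; simp [runMax]
  | cons w t ih =>
    intro m f
    have hM : runMax (w :: t) m = runMax t (max m (cntA w)) := by
      simp [runMax]
    simp only [List.foldl_cons, stepA]
    by_cases h1 : cntA w > m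
    · rw [if_pos h1]
      rw [ih (cntA w) [w]]
      have hmax : max m (cntA w) = cntA w := by omega
      have hMle : cntA w ≤ runMax t (cntA w) := le_runMax t (cntA w)
      by_cases h2 : runMax t (cntA w) > cntA w
      · rw [if_pos h2, hM, hmax, if_pos (by omega)]
        rw [List.filter_cons]
        rw [if_neg (by simp; omega)]
      · have heq : runMax t (cntA w) = cntA w := by omega
        rw [if_neg h2, hM, hmax, heq, if_pos h1]
        rw [List.filter_cons, if_pos (by simp)]
        simp
    · rw [if_neg h1]
      have hmax : max m (cntA w) = m := by omega
      rw [hM, hmax]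
      by_cases h2 : cntA w = m
      · rw [if_pos h2]
        rw [ih m (f ++ [w])]
        by_cases h3 : runMax t m > m
        · rw [if_pos h3, if_pos h3]
          rw [List.filter_cons, if_neg (by simp; omega)]
        · rw [if_neg h3, if_neg h3]
          rw [List.filter_cons, if_pos (by simp [h2])]
          simp
      · rw [if_neg h2]
        rw [ih m f]
        by_cases h3 : runMax t m > m
        · rw [if_pos h3, if_pos h3]
          have : cntA w ≠ runMax t m := by omega
          rw [List.filter_cons, if_neg (by simpa using this)]
        · rw [if_neg h3, if_neg h3]
          rw [List.filter_cons, if_neg (by simpa using h2)]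

theorem zip_filter_map (m : Nat) (ws : List String) :
    ((ws.zip (ws.map cntB)).filter (fun p => decide (p.2 = m))).map Prod.fst
      = ws.filter (fun w => decide (cntB w = m)) := by
  induction ws with
  | nil => simp
  | cons w t ih =>
    simp only [List.map_cons, List.zip_cons_cons, List.filter_cons]
    by_cases h : cntB w = m <;> simp [h, ih]

theorem alt_char (w : String) (t : List String) :
    max_unique_vovels_alt (w :: t) =
      (w :: t).filter (fun a => decide (cntB a = (t.map cntB).foldl max (cntB w))) := by
  unfold max_unique_vovels_alt
  rw [if_neg (List.cons_ne_nil w t)]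
  simp only [List.map_cons, PySem.List.max?_id_cons, Option.getD_some]
  rw [← List.map_cons]
  exact zip_filter_map _ _

-- ===== VERDICT (by name: the statement is the Claim_ definition above) =====
theorem max_unique_vovels_spec : Claim_equal_max_unique_vovels := by
  intro words _
  unfold Spec_max_unique_vovels
  cases words with
  | nil => rfl
  | cons w t =>
    have hA : max_unique_vovels (w :: t) = ((w :: t).foldl stepA (0, [])).2 := rfl
    rw [hA, foldA_char, alt_char]
    have hM : runMax (w :: t) 0 = (t.map cntB).foldl max (cntB w) := by
      have : runMax (w :: t) 0 = ((w :: t).map cntA).foldl max 0 := by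
        simp [runMax, List.foldl_map]
      rw [this]
      simp only [List.map_cons, List.foldl_cons, Nat.zero_max]
      congr 1
      · exact cntA_eq_cntB w
      · exact List.map_congr_left (fun a _ => cntA_eq_cntB a)
    by_cases h : runMax (w :: t) 0 > 0
    · rw [if_pos h]
      rw [← hM]
      exact List.filter_congr (fun a _ => by simp [cntA_eq_cntB])
    · have h0 : runMax (w :: t) 0 = 0 := by omega
      rw [if_neg h, ← hM, h0]
      simp only [List.nil_append]
      exact List.filter_congr (fun a _ => by simp [cntA_eq_cntB])
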